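-- pv_equiv track=rewrite | github.com/CzarX86/CoupaDownloads | embeddinggemma_feasibility/entity_parsing.py | _normalise_digits
-- ===== SOURCE A (Python) =====
-- from typing import Dict, Iterable, List, Optional, Sequence
--
-- def _normalise_digits(text: str) -> str:
--     """Return only the digits contained in *text* preserving sign when present."""
--
--     digits: List[str] = []
--     sign_seen = False
--     for ch in text:
--         if ch.isdigit():
--             digits.append(ch)
--         elif ch == "-" and not digits and not sign_seen:
--             digits.append(ch)
--             sign_seen = True
--     return "".join(digits)
-- ===== SOURCE B (Python) =====
-- def _normalise_digits(text: str) -> str: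
--     """Return only the digits contained in *text* preserving sign when present."""
--     digits = "".join(ch for ch in text if ch.isdigit())
--     first_digit = next((i for i, ch in enumerate(text) if ch.isdigit()), len(text))
--     first_minus = next((i for i, ch in enumerate(text) if ch == "-"), len(text))
--     if first_minus < first_digit:
--         return "-" + digits
--     return digits
-- ===== Notes on version B (the rewrite author's own statement) =====
-- stated objective: simpler
-- what changed: Replaces the stateful interleaved loop (digit accumulator plus sign_seen flag) with three independent passes: filter the digits, find the index of the first digit and of the first minus sign, and prepend a minus sign exactly when the minus precedes the first digit.
import Mathlib
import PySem

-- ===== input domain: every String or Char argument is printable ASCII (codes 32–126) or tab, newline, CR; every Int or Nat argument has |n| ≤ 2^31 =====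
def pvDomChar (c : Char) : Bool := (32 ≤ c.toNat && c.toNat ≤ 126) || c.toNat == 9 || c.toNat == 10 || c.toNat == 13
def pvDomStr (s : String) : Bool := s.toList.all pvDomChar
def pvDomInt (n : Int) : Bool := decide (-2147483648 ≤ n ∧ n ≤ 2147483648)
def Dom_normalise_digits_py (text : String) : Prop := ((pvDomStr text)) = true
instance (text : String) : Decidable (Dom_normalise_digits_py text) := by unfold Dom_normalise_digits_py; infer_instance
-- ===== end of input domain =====

-- B replaces A's single stateful loop (accumulator + sign_seen flag) by a digit filter
-- plus a first-minus/first-digit index comparison; same return value, objective: simpler.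

-- ===== PORT A =====
-- one loop step of A: append digits; append '-' once if no digit and no sign yet
def pvStepA (st : List Char × Bool) (ch : Char) : List Char × Bool :=
  if PySem.Chars.isdigit ch then (st.1 ++ [ch], st.2)
  else if ch == '-' && decide (st.1 = []) && !st.2 then (st.1 ++ [ch], true)
  else st

def normalise_digits_py (text : String) : String :=
  let st := text.toList.foldl pvStepA ([], false)
  String.mk st.1

-- ===== PORT B =====
def normalise_digits_py_alt (text : String) : String :=
  let cs := text.toList
  let digits := cs.filter PySem.Chars.isdigit
  let firstDigit := cs.findIdx PySem.Chars.isdigit        -- = len when absent (next's default)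
  let firstMinus := cs.findIdx (fun c => c == '-')        -- = len when absent
  if firstMinus < firstDigit then String.mk ('-' :: digits) else String.mk digits

-- ===== PRECONDITION & SPEC =====
def Spec_normalise_digits_py (text : String) (out : String) : Prop := out = normalise_digits_py_alt text
instance (text : String) (out : String) : Decidable (Spec_normalise_digits_py text out) := by unfold Spec_normalise_digits_py; infer_instance

-- ===== CLAIM (what is proved, stated in full; the proofs are below) =====
def Claim_equal_normalise_digits_py : Prop := ∀ (text : String), Dom_normalise_digits_py text → Spec_normalise_digits_py text (normalise_digits_py text)

-- ===== LEMMAS AND PROOFS =====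

-- once A's accumulator is non-empty, the '-' branch is dead: the loop just appends the digits
theorem pvFoldA_ne_nil (cs : List Char) (ds : List Char) (s : Bool) (h : ds ≠ []) :
    (cs.foldl pvStepA (ds, s)).1 = ds ++ cs.filter PySem.Chars.isdigit := by
  induction cs generalizing ds s with
  | nil => simp
  | cons c cs ih =>
    by_cases hd : PySem.Chars.isdigit c
    · simp [pvStepA, hd, ih (ds ++ [c]) s (by simp)]
    · simp [pvStepA, hd, h, ih ds s h]

theorem pvFoldA_eq_alt (cs : List Char) :
    (cs.foldl pvStepA ([], false)).1 =
      if cs.findIdx (fun c => c == '-') < cs.findIdx PySem.Chars.isdigit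
      then '-' :: cs.filter PySem.Chars.isdigit else cs.filter PySem.Chars.isdigit := by
  induction cs with
  | nil => simp
  | cons c cs ih =>
    by_cases hd : PySem.Chars.isdigit c
    · have hm : ¬ (c == '-') := by
        intro h; rw [beq_iff_eq] at h; subst h; revert hd; decide
      simp [pvStepA, hd, hm, List.findIdx_cons, pvFoldA_ne_nil cs [c] false (by simp)]
    · by_cases hm : c == '-'
      · rw [beq_iff_eq] at hm; subst hm
        simp [pvStepA, hd, List.findIdx_cons, pvFoldA_ne_nil cs ['-'] true (by simp)]
      · simp [pvStepA, hd, hm, List.findIdx_cons, ih]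

-- ===== VERDICT (by name: the statement is the Claim_ definition above) =====
theorem normalise_digits_py_spec : Claim_equal_normalise_digits_py := by
  intro text _
  unfold Spec_normalise_digits_py normalise_digits_py normalise_digits_py_alt
  simp only [pvFoldA_eq_alt]
  split <;> rfl
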